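-- pv_equiv track=rewrite | github.com/btrkeks/transcoda | scripts/dataset_generation/dataset_generation/composer.py | _collapse_for_merge
-- ===== SOURCE A (Python) =====
-- from collections.abc import Callable, Sequence
--
-- def _collapse_for_merge(values: tuple[str | None, ...], tokens: Sequence[str]) -> tuple[str | None, ...]:
--     collapsed: list[str | None] = []
--     idx = 0
--     while idx < len(tokens):
--         if tokens[idx] != "*v":
--             collapsed.append(values[idx])
--             idx += 1
--             continue
--         end = idx
--         merged_values: list[str | None] = []
--         while end < len(tokens) and tokens[end] == "*v":
--             merged_values.append(values[end])
--             end += 1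
--         merged_value = merged_values[0] if merged_values else None
--         if any(value != merged_value for value in merged_values[1:]):
--             merged_value = None
--         collapsed.append(merged_value)
--         idx = end
--     return tuple(collapsed)
-- ===== SOURCE B (Python) =====
-- def _collapse_for_merge(values, tokens):
--     # Single right-to-left pass: a pending state carries the merged value of the
--     # '*v' run that starts at the current position; output is built in reverse.
--     out = []
--     _EMPTY = object()
--     pending = _EMPTY
--     for i in range(len(tokens) - 1, -1, -1):
--         if tokens[i] == "*v":
--             v = values[i]
--             pending = v if (pending is _EMPTY or pending == v) else None
--         else:
--             if pending is not _EMPTY: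
--                 out.append(pending)
--                 pending = _EMPTY
--             out.append(values[i])
--     if pending is not _EMPTY:
--         out.append(pending)
--     out.reverse()
--     return tuple(out)
-- ===== Notes on version B (the rewrite author's own statement) =====
-- stated objective: alternative
-- what changed: B replaces A's left-to-right outer loop with a nested run-scanning inner loop by a single right-to-left pass over the indices that maintains a constant-size 'pending merged value' state machine and builds the output in reverse; no inner loop or run materialization.
import Mathlib
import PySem

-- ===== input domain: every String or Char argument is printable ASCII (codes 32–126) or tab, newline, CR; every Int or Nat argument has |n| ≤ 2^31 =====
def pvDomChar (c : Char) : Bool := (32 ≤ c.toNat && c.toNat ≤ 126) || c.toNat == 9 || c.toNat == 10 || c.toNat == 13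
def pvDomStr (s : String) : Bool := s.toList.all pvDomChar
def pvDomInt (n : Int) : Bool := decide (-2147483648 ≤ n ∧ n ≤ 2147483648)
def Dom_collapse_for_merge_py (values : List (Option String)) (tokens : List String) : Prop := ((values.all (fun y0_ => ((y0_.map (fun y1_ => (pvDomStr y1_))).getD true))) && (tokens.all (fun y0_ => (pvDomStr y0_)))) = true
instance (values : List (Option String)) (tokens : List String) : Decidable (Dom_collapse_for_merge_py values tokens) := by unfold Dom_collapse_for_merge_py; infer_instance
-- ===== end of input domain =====

-- B replaces A's nested left-to-right run-scanning loops by a single right-to-left pass with a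
-- constant-size pending-merged-value state machine (objective: alternative; same asymptotic cost).
-- Both programs raise IndexError when len(values) < len(tokens); Pre_ excludes exactly those inputs,
-- so values[i] (always in range under Pre_) is ported as getD.

-- ===== PORT A =====
-- inner while loop: 'while end < len(tokens) and tokens[end] == "*v": merged_values.append(values[end]); end += 1'
-- (fuel = structural bound making the while loop total; fuel ≥ len(tokens) - end, so it never runs out)
def pvAInner (values : List (Option String)) (tokens : List String) : Nat → Nat → List (Option String) → Nat × List (Option String)
  | 0, e, acc => (e, acc)
  | fuel + 1, e, acc =>
    if e < tokens.length ∧ tokens.getD e "" = "*v" then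
      pvAInner values tokens fuel (e + 1) (acc ++ [values.getD e none])
    else (e, acc)

-- outer while loop of A (fuel ≥ len(tokens) - idx; idx strictly increases each iteration)
def pvAOuter (values : List (Option String)) (tokens : List String) : Nat → Nat → List (Option String) → List (Option String)
  | 0, _, collapsed => collapsed
  | fuel + 1, idx, collapsed =>
    if idx < tokens.length then
      if tokens.getD idx "" ≠ "*v" then
        pvAOuter values tokens fuel (idx + 1) (collapsed ++ [values.getD idx none])
      else
        let r := pvAInner values tokens tokens.length idx []
        let merged0 := r.2.headD none   -- merged_values[0] if merged_values else None
        let merged := if r.2.tail.any (fun v => !(v == merged0)) then none else merged0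
        pvAOuter values tokens fuel r.1 (collapsed ++ [merged])
    else collapsed

def collapse_for_merge_py (values : List (Option String)) (tokens : List String) : List (Option String) :=
  pvAOuter values tokens tokens.length 0 []

-- ===== PORT B =====
-- one step of B's right-to-left loop body; state = (out in reverse order, pending merged value
-- of the '*v' run starting right here; none plays the role of the _EMPTY sentinel)
def pvBStep (values : List (Option String)) (tokens : List String) (i : Nat)
    (st : List (Option String) × Option (Option String)) : List (Option String) × Option (Option String) :=
  if tokens.getD i "" = "*v" then
    let v := values.getD i none
    (st.1, some (match st.2 with
                 | none => v
                 | some p => if p == v then v else none))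
  else
    let out := match st.2 with
               | none => st.1
               | some p => st.1 ++ [p]
    (out ++ [values.getD i none], none)

-- 'for i in range(len(tokens)-1, -1, -1)' = foldr over the indices (rightmost processed first)
def collapse_for_merge_py_alt (values : List (Option String)) (tokens : List String) : List (Option String) :=
  let st := (List.range tokens.length).foldr (pvBStep values tokens) ([], none)
  let out := match st.2 with
             | none => st.1
             | some p => st.1 ++ [p]
  out.reverse

-- ===== PRECONDITION & SPEC =====
-- Both A and B raise IndexError when len(values) < len(tokens) (values[i] for some i < len(tokens)).
def Pre_collapse_for_merge_py (values : List (Option String)) (tokens : List String) : Prop :=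
  tokens.length ≤ values.length
instance (values : List (Option String)) (tokens : List String) : Decidable (Pre_collapse_for_merge_py values tokens) := by unfold Pre_collapse_for_merge_py; infer_instance

def pvWitness_collapse_for_merge_py : List (Option String) × List String :=
  ([some "a", some "b", some "b"], ["x", "*v", "*v"])

def Spec_collapse_for_merge_py (values : List (Option String)) (tokens : List String) (out : List (Option String)) : Prop := out = collapse_for_merge_py_alt values tokens
instance (values : List (Option String)) (tokens : List String) (out : List (Option String)) : Decidable (Spec_collapse_for_merge_py values tokens out) := by unfold Spec_collapse_for_merge_py; infer_instance

-- ===== CLAIM (what is proved, stated in full; the proofs are below) =====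
def Claim_equal_collapse_for_merge_py : Prop := ∀ (values : List (Option String)) (tokens : List String), Dom_collapse_for_merge_py values tokens → Pre_collapse_for_merge_py values tokens → Spec_collapse_for_merge_py values tokens (collapse_for_merge_py values tokens)

-- ===== LEMMAS AND PROOFS =====

def pvKey (tokens : List String) (i : Nat) : Bool := tokens.getD i "" == "*v"

def pvBfold (values : List (Option String)) (tokens : List String) (l : List Nat) : List (Option String) × Option (Option String) :=
  l.foldr (pvBStep values tokens) ([], none)

def pvFlush (st : List (Option String) × Option (Option String)) : List (Option String) :=
  match st.2 with
  | none => st.1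
  | some p => st.1 ++ [p]

-- the merged value B's pending state computes over a '*v' run v :: t (in index order)
def pvMergeR : Option String → List (Option String) → Option String
  | v, [] => v
  | v, w :: t => if pvMergeR w t == v then v else none

-- pvMergeR = A's merge formula (head if all equal, else None)
theorem pvMergeR_eq (v : Option String) (t : List (Option String)) :
    pvMergeR v t = if t.all (· == v) then v else none := by
  induction t generalizing v with
  | nil => simp [pvMergeR]
  | cons w t ih =>
    rw [pvMergeR, ih w]
    by_cases hall : t.all (· == w)
    · rw [if_pos hall]
      by_cases hwv : w = v
      · subst hwv
        simp [hall]
      · have : ((w :: t).all (· == v)) = false := by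
          simp only [List.all_cons, Bool.and_eq_false_iff]
          left; simpa using hwv
        rw [this, if_neg (by simpa using hwv)]
        simp
    · rw [if_neg hall]
      have h2 : ((w :: t).all (· == v)) = false := by
        by_contra hc
        rw [Bool.not_eq_false] at hc
        simp only [List.all_cons, Bool.and_eq_true, beq_iff_eq] at hc
        apply hall
        simp only [List.all_eq_true, beq_iff_eq] at *
        intro x hx
        rw [hc.2 x hx, hc.1]
      rw [h2]
      by_cases hv : v = none
      · subst hv; simp
      · have hbe : (none == v) = false := by
          simp only [beq_eq_false_iff_ne, ne_eq]
          exact fun hc => hv hc.symm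
        simp [hbe]

-- folding B's step over a '*v' run with pending = none accumulates pvMergeR and leaves out untouched
theorem pvBfold_run (values : List (Option String)) (tokens : List String) (i : Nat) (G : List Nat)
    (out0 : List (Option String)) (hk : ∀ j ∈ i :: G, pvKey tokens j = true) :
    (i :: G).foldr (pvBStep values tokens) (out0, none) =
      (out0, some (pvMergeR (values.getD i none) (G.map (fun j => values.getD j none)))) := by
  induction G generalizing i with
  | nil =>
    have := hk i (List.mem_cons_self ..)
    simp only [pvKey, List.getD, beq_iff_eq] at this
    simp [pvBStep, List.getD, this, pvMergeR]
  | cons j t ih =>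
    have hi := hk i (List.mem_cons_self ..)
    simp only [pvKey, List.getD, beq_iff_eq] at hi
    have hrest := ih j (fun x hx => hk x (List.mem_cons_of_mem _ hx))
    simp only [List.foldr_cons] at hrest ⊢
    rw [hrest]
    simp [pvBStep, List.getD, hi, pvMergeR]

-- the pending state is none whenever the current position is not inside a '*v' run
theorem pvBfold_snd_none (values : List (Option String)) (tokens : List String) (idx : Nat)
    (h : ¬ (idx < tokens.length ∧ pvKey tokens idx = true)) :
    (pvBfold values tokens (List.range' idx (tokens.length - idx))).2 = none := by
  by_cases hlt : idx < tokens.length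
  · have hk : pvKey tokens idx = false := by
      rcases Bool.eq_false_or_eq_true (pvKey tokens idx) with h1 | h1
      · exact absurd ⟨hlt, h1⟩ h
      · exact h1
    have hr : tokens.length - idx = (tokens.length - (idx + 1)) + 1 := by omega
    rw [hr, List.range'_succ]
    simp only [pvBfold, List.foldr_cons]
    have : tokens[idx]?.getD "" ≠ "*v" := by simpa [pvKey, List.getD] using hk
    simp [pvBStep, this]
  · have : tokens.length - idx = 0 := by omega
    rw [this]
    simp [pvBfold]

theorem pv_takeWhile_stop (p : Nat → Bool) (s m : Nat)
    (h : ((List.range' s m).takeWhile p).length < m) :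
    p (s + ((List.range' s m).takeWhile p).length) = false := by
  induction m generalizing s with
  | zero => simp at h
  | succ m ih =>
    rw [List.range'_succ] at h ⊢
    by_cases hp : p s
    · rw [List.takeWhile_cons_of_pos hp] at h ⊢
      simp only [List.length_cons] at h ⊢
      have := ih (s + 1) (by omega)
      rw [show s + (((List.range' (s + 1) m).takeWhile p).length + 1)
            = s + 1 + ((List.range' (s + 1) m).takeWhile p).length from by omega]
      exact this
    · rw [List.takeWhile_cons_of_neg hp]
      simpa using hp

theorem pv_dropWhile_range' (p : Nat → Bool) (s m : Nat) :
    (List.range' s m).dropWhile p =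
      List.range' (s + ((List.range' s m).takeWhile p).length) (m - ((List.range' s m).takeWhile p).length) := by
  induction m generalizing s with
  | zero => simp [List.range']
  | succ m ih =>
    rw [List.range'_succ]
    by_cases h : p s
    · rw [List.dropWhile_cons_of_pos h, List.takeWhile_cons_of_pos h, ih (s+1)]
      simp only [List.length_cons]
      congr 1 <;> omega
    · rw [List.dropWhile_cons_of_neg h, List.takeWhile_cons_of_neg h]
      simp [List.range'_succ]

-- inner-loop characterization over an index range
theorem pvAInner_eq (values : List (Option String)) (tokens : List String) (fuel e : Nat) (acc : List (Option String))
    (hf : tokens.length - e ≤ fuel) :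
    pvAInner values tokens fuel e acc =
      (e + ((List.range' e (tokens.length - e)).takeWhile (pvKey tokens)).length,
       acc ++ ((List.range' e (tokens.length - e)).takeWhile (pvKey tokens)).map (fun j => values.getD j none)) := by
  induction fuel generalizing e acc with
  | zero =>
    have hr : tokens.length - e = 0 := by omega
    rw [pvAInner, hr]
    simp
  | succ fuel ih =>
    rw [pvAInner]
    by_cases h : e < tokens.length ∧ tokens.getD e "" = "*v"
    · rw [if_pos h]
      have hk : pvKey tokens e = true := by simp only [pvKey, List.getD, beq_iff_eq]; exact h.2
      have hr : tokens.length - e = (tokens.length - (e + 1)) + 1 := by omega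
      rw [ih (e + 1) (acc ++ [values.getD e none]) (by omega)]
      rw [hr, List.range'_succ, List.takeWhile_cons_of_pos hk]
      simp only [List.length_cons, List.map_cons, List.append_assoc, List.singleton_append]
      simp only [Prod.mk.injEq]
      exact ⟨by omega, trivial⟩
    · rw [if_neg h]
      by_cases he : e < tokens.length
      · have hk : pvKey tokens e = false := by
          simp only [not_and] at h
          have hne := h he
          simp only [pvKey, beq_eq_false_iff_ne, ne_eq]
          simpa [List.getD] using hne
        have hr : tokens.length - e = (tokens.length - (e + 1)) + 1 := by omega
        rw [hr, List.range'_succ, List.takeWhile_cons_of_neg (by simp [hk])]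
        simp
      · have hr : tokens.length - e = 0 := by omega
        rw [hr]
        simp

theorem pv_main (values : List (Option String)) (tokens : List String) (fuel idx : Nat) (acc : List (Option String))
    (hf : tokens.length - idx ≤ fuel) :
    pvAOuter values tokens fuel idx acc =
      acc ++ (pvFlush (pvBfold values tokens (List.range' idx (tokens.length - idx)))).reverse := by
  induction fuel generalizing idx acc with
  | zero =>
    have hr : tokens.length - idx = 0 := by omega
    rw [pvAOuter, hr]
    simp [pvBfold, pvFlush]
  | succ fuel ih => ?_
  rw [pvAOuter]
  by_cases h : idx < tokens.length
  · rw [if_pos h]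
    have hr : tokens.length - idx = (tokens.length - (idx + 1)) + 1 := by omega
    by_cases h2 : tokens.getD idx "" ≠ "*v"
    · rw [if_pos h2, ih (idx + 1) _ (by omega)]
      rw [hr, List.range'_succ]
      simp only [pvBfold, List.foldr_cons]
      have hstep : pvBStep values tokens idx
          ((List.range' (idx+1) (tokens.length - (idx+1))).foldr (pvBStep values tokens) ([], none)) =
          (pvFlush (pvBfold values tokens (List.range' (idx+1) (tokens.length - (idx+1)))) ++ [values.getD idx none], none) := by
        have h2' : ¬ tokens[idx]?.getD "" = "*v" := by simpa [List.getD] using h2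
        simp only [pvBStep, List.getD]
        rw [if_neg h2']
        rfl
      rw [hstep]
      simp only [pvFlush, pvBfold]
      simp
    · rw [if_neg h2]
      rw [Decidable.not_not] at h2
      have hk : pvKey tokens idx = true := by simp only [pvKey, List.getD, beq_iff_eq]; exact h2
      rw [pvAInner_eq values tokens tokens.length idx [] (by omega)]
      have hG : (List.range' idx (tokens.length - idx)).takeWhile (pvKey tokens)
          = idx :: (List.range' (idx + 1) (tokens.length - (idx + 1))).takeWhile (pvKey tokens) := by
        rw [hr, List.range'_succ, List.takeWhile_cons_of_pos hk]
      generalize hG1 : (List.range' (idx + 1) (tokens.length - (idx + 1))).takeWhile (pvKey tokens) = G1 at hG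
      rw [hG]
      simp only [List.nil_append, List.length_cons, List.map_cons, List.headD_cons, List.tail_cons]
      rw [ih (idx + (G1.length + 1)) _ (by omega)]
      have hcont : List.range' (idx + (G1.length + 1)) (tokens.length - (idx + (G1.length + 1)))
          = (List.range' (idx + 1) (tokens.length - (idx + 1))).dropWhile (pvKey tokens) := by
        rw [pv_dropWhile_range' (pvKey tokens) (idx + 1) (tokens.length - (idx + 1)), hG1]
        congr 1 <;> omega
      -- the state after the run has pending = none
      have hsnd : (pvBfold values tokens (List.range' (idx + (G1.length + 1)) (tokens.length - (idx + (G1.length + 1))))).2 = none := by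
        apply pvBfold_snd_none
        rintro ⟨hlt, hkey⟩
        have hlen : ((List.range' idx (tokens.length - idx)).takeWhile (pvKey tokens)).length < tokens.length - idx := by
          rw [hG]
          simp only [List.length_cons]
          omega
        have hstop := pv_takeWhile_stop (pvKey tokens) idx (tokens.length - idx) hlen
        rw [hG] at hstop
        simp only [List.length_cons] at hstop
        rw [hstop] at hkey
        exact absurd hkey (by simp)
      -- split the range into the leading run and the rest, and compute the fold over the run
      have hsplit : List.range' idx (tokens.length - idx)
          = (idx :: G1) ++ List.range' (idx + (G1.length + 1)) (tokens.length - (idx + (G1.length + 1))) := by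
        rw [hcont]
        conv_lhs => rw [← List.takeWhile_append_dropWhile (p := pvKey tokens) (l := List.range' idx (tokens.length - idx))]
        rw [hG]
        congr 1
        rw [hr, List.range'_succ]
        simp [List.dropWhile_cons_of_pos hk]
      have hGkey : ∀ j ∈ idx :: G1, pvKey tokens j = true := by
        intro j hj
        rcases List.mem_cons.mp hj with rfl | hj'
        · exact hk
        · exact List.mem_takeWhile_imp (hG1 ▸ hj')
      have hbase : (List.range' (idx + (G1.length + 1)) (tokens.length - (idx + (G1.length + 1)))).foldr (pvBStep values tokens) ([], none)
          = ((pvBfold values tokens (List.range' (idx + (G1.length + 1)) (tokens.length - (idx + (G1.length + 1))))).1, none) := by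
        exact Prod.ext_iff.mpr ⟨rfl, hsnd⟩
      have hfold : pvBfold values tokens (List.range' idx (tokens.length - idx))
          = ((pvBfold values tokens (List.range' (idx + (G1.length + 1)) (tokens.length - (idx + (G1.length + 1))))).1,
             some (pvMergeR (values.getD idx none) (G1.map (fun j => values.getD j none)))) := by
        rw [pvBfold, hsplit, List.foldr_append, hbase]
        exact pvBfold_run values tokens idx G1 _ hGkey
      have hmerge : (if (G1.map (fun j => values.getD j none)).any (fun v => !(v == values.getD idx none)) then none else values.getD idx none)
          = pvMergeR (values.getD idx none) (G1.map (fun j => values.getD j none)) := by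
        rw [pvMergeR_eq]
        by_cases hall : (G1.map (fun j => values.getD j none)).all (· == values.getD idx none)
        · rw [if_pos hall, if_neg]
          simp only [List.all_eq_true] at hall
          simp only [List.any_eq_true, not_exists, not_and, Bool.not_eq_true', Bool.not_eq_false]
          intro x hx
          exact hall x hx
        · rw [if_neg hall, if_pos]
          simp only [List.all_eq_true, not_forall] at hall
          obtain ⟨x, hx, hne⟩ := hall
          simp only [List.any_eq_true]
          exact ⟨x, hx, by simpa using hne⟩
      have hflushrest : pvFlush (pvBfold values tokens (List.range' (idx + (G1.length + 1)) (tokens.length - (idx + (G1.length + 1)))))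
          = (pvBfold values tokens (List.range' (idx + (G1.length + 1)) (tokens.length - (idx + (G1.length + 1))))).1 := by
        rw [pvFlush, hsnd]
      rw [hfold, hmerge, hflushrest]
      simp [pvFlush]
  · rw [if_neg h]
    have hr : tokens.length - idx = 0 := by omega
    rw [hr]
    simp [pvBfold, pvFlush]

-- ===== VERDICT (by name: the statement is the Claim_ definition above) =====
theorem collapse_for_merge_py_spec : Claim_equal_collapse_for_merge_py := by
  intro values tokens _ _
  unfold Spec_collapse_for_merge_py collapse_for_merge_py collapse_for_merge_py_alt
  have := pv_main values tokens tokens.length 0 [] (by omega)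
  simpa [pvBfold, pvFlush, List.range_eq_range'] using this
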